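-- pv_equiv track=rewrite | github.com/fierylion/Maze-Visualization | main_program.py | node_index
-- ===== SOURCE A (Python) =====
-- def node_index(edges):
--     index_to_edge = {}
--     idx = 0  # Assing index to each node
--     for n1, n2 in edges:
--         if n1 not in index_to_edge:
--             index_to_edge[n1] = idx
--             idx += 1
--         if n2 not in index_to_edge:
--             index_to_edge[n2] = idx
--             idx += 1
--     return index_to_edge
-- ===== SOURCE B (Python) =====
-- def node_index(edges):
--     stream = [n for n1, n2 in edges for n in (n1, n2)]
--     first = {n: pos for pos, n in reversed(list(enumerate(stream)))}
--     return {n: i for i, n in enumerate(sorted(first, key=first.get))}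
-- ===== Notes on version B (the rewrite author's own statement) =====
-- stated objective: alternative
-- what changed: Instead of threading an index counter through one membership-tested dict-building pass, B flattens the edges into a node stream, builds a first-position dict by overwriting while iterating the enumerated stream in reverse (no membership test), then sorts the nodes by first position and enumerates them.
import Mathlib
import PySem

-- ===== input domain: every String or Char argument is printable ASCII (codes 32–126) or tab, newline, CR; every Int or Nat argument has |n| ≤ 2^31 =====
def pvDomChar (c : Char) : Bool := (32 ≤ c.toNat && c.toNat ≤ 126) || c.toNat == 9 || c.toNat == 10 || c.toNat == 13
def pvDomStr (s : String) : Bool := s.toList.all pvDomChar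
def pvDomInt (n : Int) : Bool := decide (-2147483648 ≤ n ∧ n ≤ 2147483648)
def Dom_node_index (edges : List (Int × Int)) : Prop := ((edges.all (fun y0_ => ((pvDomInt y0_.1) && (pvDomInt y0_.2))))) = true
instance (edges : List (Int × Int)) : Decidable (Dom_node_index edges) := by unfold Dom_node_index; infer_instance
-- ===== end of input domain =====

-- B replaces A's counter-threading dict loop by a different algorithm: reverse-overwrite dict of first stream positions, then sort nodes by that position and enumerate (alternative decomposition, same cost up to the sort).


-- ===== PORT A =====
def node_index (edges : List (Int × Int)) : List (Int × Int) :=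
  let res := edges.foldl (fun (st : PySem.Dict Int Int × Int) e =>
      let st1 := if st.1.contains e.1 then st else (st.1.insert e.1 st.2, st.2 + 1)
      if st1.1.contains e.2 then st1 else (st1.1.insert e.2 st1.2, st1.2 + 1))
    (PySem.Dict.empty, 0)
  res.1.items

-- ===== PORT B =====
-- first.get is total on first's keys (every key was inserted), so the sort key is ported as getD _ 0
def node_index_alt (edges : List (Int × Int)) : List (Int × Int) :=
  let stream := edges.flatMap (fun e => [e.1, e.2])
  let first := ((PySem.List.enumerate stream).reverse).foldl
      (fun (d : PySem.Dict Int Int) p => d.insert p.2 p.1) PySem.Dict.empty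
  (PySem.List.enumerate
      (PySem.List.sorted first.keys (fun n => first.getD n 0) false)).map (fun p => (p.2, p.1))

-- ===== PRECONDITION & SPEC =====
def Spec_node_index (edges : List (Int × Int)) (out : List (Int × Int)) : Prop := out = node_index_alt edges
instance (edges : List (Int × Int)) (out : List (Int × Int)) : Decidable (Spec_node_index edges out) := by unfold Spec_node_index; infer_instance

-- ===== CLAIM (what is proved, stated in full; the proofs are below) =====
def Claim_equal_node_index : Prop := ∀ (edges : List (Int × Int)), Dom_node_index edges → Spec_node_index edges (node_index edges)

-- ===== LEMMAS AND PROOFS =====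

-- ### A side: the loop builds the dict enumerating the distinct nodes in first-occurrence order

-- one node step of A's loop
def niStep (st : PySem.Dict Int Int × Int) (n : Int) : PySem.Dict Int Int × Int :=
  if st.1.contains n then st else (st.1.insert n st.2, st.2 + 1)

-- the dict A has built after seeing exactly the distinct keys ks, in order
def niEnum (ks : List Int) : PySem.Dict Int Int :=
  PySem.Dict.mk ((PySem.List.enumerate ks).map (fun p => (p.2, p.1)))

lemma niEnum_keys (ks : List Int) : (niEnum ks).keys = ks := by
  simp [niEnum, PySem.Dict.keys, List.map_map, Function.comp_def,
    PySem.List.map_snd_enumerate]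

lemma niEnum_contains (ks : List Int) (n : Int) :
    (niEnum ks).contains n = decide (n ∈ ks) := by
  by_cases h : n ∈ ks
  · simp [h, (PySem.Dict.contains_iff_mem_keys (niEnum ks) n).mpr (by simpa [niEnum_keys])]
  · rw [decide_eq_false h, Bool.eq_false_iff]
    intro hc
    exact h (by simpa [niEnum_keys] using (PySem.Dict.contains_iff_mem_keys (niEnum ks) n).mp hc)

lemma niEnum_append (ks : List Int) (n : Int) (hn : n ∉ ks) :
    (niEnum ks).insert n (ks.length : Int) = niEnum (ks ++ [n]) := by
  apply PySem.Dict.ext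
  rw [PySem.Dict.items_insert, niEnum_contains]
  simp [hn, niEnum, PySem.List.enumerate_append, PySem.List.enumerate_cons,
    PySem.List.enumerate_nil]

lemma niStep_invariant (ns : List Int) (ks : List Int) (hk : ks.Nodup) :
    ns.foldl niStep (niEnum ks, (ks.length : Int)) =
      (niEnum (PySem.Set.update ks ns), ((PySem.Set.update ks ns).length : Int)) := by
  induction ns generalizing ks with
  | nil => simp [PySem.Set.update_nil]
  | cons n ns ih =>
    rw [List.foldl_cons, PySem.Set.update_cons]
    by_cases h : n ∈ ks
    · have hadd : PySem.Set.add ks n = ks := by simp [PySem.Set.add, h]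
      have hstep : niStep (niEnum ks, (ks.length : Int)) n = (niEnum ks, (ks.length : Int)) := by
        simp [niStep, niEnum_contains, h]
      rw [hstep, hadd, ih ks hk]
    · have hadd : PySem.Set.add ks n = ks ++ [n] := by simp [PySem.Set.add, h]
      have hstep : niStep (niEnum ks, (ks.length : Int)) n
          = (niEnum (ks ++ [n]), ((ks ++ [n]).length : Int)) := by
        simp [niStep, niEnum_contains, h, niEnum_append ks n h]
      rw [hstep, hadd, ih (ks ++ [n])
        (by
          rw [List.nodup_append]
          refine ⟨hk, List.nodup_singleton n, ?_⟩
          intro a ha b hb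
          simp only [List.mem_singleton] at hb
          subst hb
          exact fun he => h (he ▸ ha))]

lemma niFold_flat (edges : List (Int × Int)) (st : PySem.Dict Int Int × Int) :
    edges.foldl (fun (st : PySem.Dict Int Int × Int) e =>
        let st1 := if st.1.contains e.1 then st else (st.1.insert e.1 st.2, st.2 + 1)
        if st1.1.contains e.2 then st1 else (st1.1.insert e.2 st1.2, st1.2 + 1)) st
      = (edges.flatMap (fun e => [e.1, e.2])).foldl niStep st := by
  induction edges generalizing st with
  | nil => rfl
  | cons e es ih => simp only [List.foldl_cons, List.flatMap_cons, List.foldl_append]; exact ih _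

-- ### B side: the reverse-overwrite dict maps each node of the stream to its FIRST position

-- B's first-position dict over the stream l whose positions start at s
def bDict (l : List Int) (s : Int) : PySem.Dict Int Int :=
  ((PySem.List.enumerate l s).reverse).foldl
    (fun (d : PySem.Dict Int Int) p => d.insert p.2 p.1) PySem.Dict.empty

lemma bDict_eq_foldr (l : List Int) (s : Int) :
    bDict l s = (PySem.List.enumerate l s).foldr
      (fun p (d : PySem.Dict Int Int) => d.insert p.2 p.1) PySem.Dict.empty := by
  simp [bDict, List.foldl_reverse]

lemma bDict_get? (l : List Int) (s : Int) (n : Int) :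
    (bDict l s).get? n = (PySem.List.index? l n).map (fun k => s + (k : Int)) := by
  induction l generalizing s with
  | nil =>
    simp [bDict_eq_foldr, PySem.List.enumerate_nil, PySem.Dict.get?_empty,
      PySem.List.index?_eq_idxOf?]
  | cons x xs ih =>
    have hstep : bDict (x :: xs) s = (bDict xs (s + 1)).insert x s := by
      simp [bDict_eq_foldr, PySem.List.enumerate_cons]
    rw [hstep]
    by_cases hx : n = x
    · subst hx
      rw [PySem.Dict.get?_insert_self, PySem.List.index?_cons_self]
      simp
    · rw [PySem.Dict.get?_insert_of_ne _ _ hx, ih (s + 1),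
        PySem.List.index?_cons_of_ne _ (fun he => hx he.symm)]
      cases PySem.List.index? xs n with
      | none => simp
      | some k => simp; ring

lemma bDict_mem_keys (l : List Int) (s : Int) (n : Int) :
    n ∈ (bDict l s).keys ↔ n ∈ l := by
  rw [← not_iff_not, ← PySem.Dict.get?_eq_none_iff_not_mem_keys, bDict_get?]
  cases hidx : PySem.List.index? l n with
  | none => simp [(PySem.List.index?_eq_none_iff l n).mp hidx]
  | some k =>
    have hm : n ∈ l := (PySem.List.index?_isSome_iff l n).mp (by rw [hidx]; rfl)
    simp [hm]

lemma bDict_nodup_keys (l : List Int) (s : Int) : (bDict l s).keys.Nodup := by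
  induction l generalizing s with
  | nil => simp [bDict_eq_foldr, PySem.List.enumerate_nil]
  | cons x xs ih =>
    have hstep : bDict (x :: xs) s = (bDict xs (s + 1)).insert x s := by
      simp [bDict_eq_foldr, PySem.List.enumerate_cons]
    rw [hstep]
    exact PySem.Dict.nodup_keys_insert _ _ _ (ih (s + 1))

-- the first position of n in the stream l (index of its first occurrence)
def firstPos (l : List Int) (n : Int) : Nat := (PySem.List.index? l n).getD 0

lemma firstPos_cons_self (x : Int) (xs : List Int) : firstPos (x :: xs) x = 0 := by
  unfold firstPos
  rw [PySem.List.index?_cons_self]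
  rfl

lemma firstPos_cons_ne (x : Int) (xs : List Int) (n : Int) (h : x ≠ n) (hm : n ∈ xs) :
    firstPos (x :: xs) n = firstPos xs n + 1 := by
  obtain ⟨k, hk⟩ := Option.isSome_iff_exists.mp ((PySem.List.index?_isSome_iff xs n).mpr hm)
  unfold firstPos
  rw [PySem.List.index?_cons_of_ne _ h, hk]
  rfl

lemma bDict_getD (l : List Int) (n : Int) (hn : n ∈ l) :
    (bDict l 0).getD n 0 = ((firstPos l n : Nat) : Int) := by
  obtain ⟨k, hk⟩ := Option.isSome_iff_exists.mp ((PySem.List.index?_isSome_iff l n).mpr hn)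
  rw [PySem.Dict.getD_eq_get?_getD, bDict_get?, hk]
  unfold firstPos
  rw [hk]
  simp

-- the distinct nodes in first-occurrence order are strictly increasing in first position
lemma dedup_pairwise_firstPos (l : List Int) :
    (PySem.List.dedup l).Pairwise (fun a b => firstPos l a < firstPos l b) := by
  simp only [PySem.List.dedup_eq_ofList]
  induction l with
  | nil => simp [PySem.Set.ofList_nil]
  | cons x xs ih =>
    rw [PySem.Set.ofList_cons]
    refine List.Pairwise.cons ?_ ?_
    · intro b hb
      obtain ⟨hbs, hbx⟩ := (PySem.Set.mem_discard _ _ _).mp hb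
      have hbxs : b ∈ xs := (PySem.Set.mem_ofList _ _).mp hbs
      rw [firstPos_cons_self, firstPos_cons_ne x xs b (fun h => hbx h.symm) hbxs]
      omega
    · have hsub : (PySem.Set.discard (PySem.Set.ofList xs) x).Sublist (PySem.Set.ofList xs) := by
        simp only [PySem.Set.discard]
        exact List.filter_sublist
      refine ((ih.sublist hsub).imp_of_mem ?_)
      intro a b ha hb hab
      obtain ⟨has, hax⟩ := (PySem.Set.mem_discard _ _ _).mp ha
      obtain ⟨hbs, hbx⟩ := (PySem.Set.mem_discard _ _ _).mp hb
      rw [firstPos_cons_ne x xs a (fun h => hax h.symm) ((PySem.Set.mem_ofList _ _).mp has),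
        firstPos_cons_ne x xs b (fun h => hbx h.symm) ((PySem.Set.mem_ofList _ _).mp hbs)]
      omega

-- sorting the dict's keys by first position recovers exactly first-occurrence order
lemma sorted_bDict_keys (l : List Int) :
    PySem.List.sorted (bDict l 0).keys (fun n => (bDict l 0).getD n 0) false
      = PySem.List.dedup l := by
  apply PySem.List.sorted_eq_of_perm_of_pairwise_lt
  · refine (List.perm_ext_iff_of_nodup (PySem.List.nodup_dedup l) (bDict_nodup_keys l 0)).mpr ?_
    intro a
    rw [PySem.List.mem_dedup, bDict_mem_keys]
  · refine ((dedup_pairwise_firstPos l).imp_of_mem ?_)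
    intro a b ha hb hab
    rw [bDict_getD l a (by simpa using (PySem.List.mem_dedup l a).mp ha),
      bDict_getD l b (by simpa using (PySem.List.mem_dedup l b).mp hb)]
    exact_mod_cast hab

-- sorted_bDict_keys with bDict spelled out as it appears in node_index_alt (definitional)
lemma sorted_keys_unfolded (l : List Int) :
    PySem.List.sorted
      (((PySem.List.enumerate l).reverse).foldl
        (fun (d : PySem.Dict Int Int) p => d.insert p.2 p.1) PySem.Dict.empty).keys
      (fun n => (((PySem.List.enumerate l).reverse).foldl
        (fun (d : PySem.Dict Int Int) p => d.insert p.2 p.1) PySem.Dict.empty).getD n 0) false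
      = PySem.List.dedup l := sorted_bDict_keys l

-- ===== VERDICT (by name: the statement is the Claim_ definition above) =====
theorem node_index_spec : Claim_equal_node_index := by
  intro edges _
  unfold Spec_node_index node_index
  simp only [node_index_alt]
  rw [niFold_flat]
  have h0 : List.foldl niStep (PySem.Dict.empty, 0) (edges.flatMap (fun e => [e.1, e.2]))
      = (niEnum (PySem.Set.update [] (edges.flatMap (fun e => [e.1, e.2]))),
         ((PySem.Set.update [] (edges.flatMap (fun e => [e.1, e.2]))).length : Int)) :=
    niStep_invariant _ [] List.nodup_nil
  rw [h0, sorted_keys_unfolded]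
  simp [niEnum, PySem.List.dedup, PySem.Set.update_nil_left]
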